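-- pv_equiv track=rewrite | github.com/alexalvis/RobustSensorAllocation | sensorallocationGeneral2.py | AssignReward
-- ===== SOURCE A (Python) =====
-- def AssignReward(G, statespace, actiondef, actionatt, reward):
--     Reward = {}
--     for i in range(len(statespace)):
--         Reward[i] = {}
--         state = statespace[i]
--         for act_d in range(actiondef):
--             Reward[i][act_d] = {}
--             for act_a in range(actionatt):
--                 if state in G and act_d == 0:
--                     Reward[i][act_d][act_a] = reward
--                 else:
--                     Reward[i][act_d][act_a] = 0
--     return Reward
-- ===== SOURCE B (Python) =====
-- def AssignReward(G, statespace, actiondef, actionatt, reward):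
--     # Template rows built once, then one flat loop over row indices decoded by divmod;
--     # each row is a cheap copy of the right template.
--     Gs = set(G)
--     zero_row = dict.fromkeys(range(actionatt), 0)
--     goal_row = dict.fromkeys(range(actionatt), reward)
--     Reward = {i: {} for i in range(len(statespace))}
--     for t in range(len(statespace) * actiondef):
--         i, d = divmod(t, actiondef)
--         Reward[i][d] = dict(goal_row if d == 0 and statespace[i] in Gs else zero_row)
--     return Reward
-- ===== Notes on version B (the rewrite author's own statement) =====
-- stated objective: alternative
-- what changed: Replaces A's per-cell triple nested loop with a per-cell branch and per-cell list-membership scan by building two template rows once and filling the table in a single flat loop over row indices decoded with divmod, copying the right template per row.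
import Mathlib
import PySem

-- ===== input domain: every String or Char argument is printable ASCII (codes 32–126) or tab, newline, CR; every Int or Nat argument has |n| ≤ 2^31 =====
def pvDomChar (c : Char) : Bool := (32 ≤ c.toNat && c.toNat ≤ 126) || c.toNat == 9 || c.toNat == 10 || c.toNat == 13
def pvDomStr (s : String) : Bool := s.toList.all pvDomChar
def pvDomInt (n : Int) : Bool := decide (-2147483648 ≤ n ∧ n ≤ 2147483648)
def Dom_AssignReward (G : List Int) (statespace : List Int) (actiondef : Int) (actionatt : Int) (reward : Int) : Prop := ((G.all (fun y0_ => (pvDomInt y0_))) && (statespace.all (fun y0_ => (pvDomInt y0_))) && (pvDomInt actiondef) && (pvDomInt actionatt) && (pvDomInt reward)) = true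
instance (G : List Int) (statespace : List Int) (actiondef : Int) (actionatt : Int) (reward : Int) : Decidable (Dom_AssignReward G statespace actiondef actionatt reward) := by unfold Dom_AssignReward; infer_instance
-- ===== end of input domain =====

-- B builds two template rows once and fills the table in ONE flat loop over row indices
-- decoded by divmod, instead of A's per-cell triple loop with a per-cell branch (alternative decomposition).

-- ===== PORT A =====
-- Each Python dict receives fresh, strictly increasing keys (range indices), so
-- 'Reward[k] = v' is exactly appending the pair (k, v): the foldl-append below is the
-- literal transliteration of A's dict-building loops.
def AssignReward (G : List Int) (statespace : List Int) (actiondef : Int) (actionatt : Int) (reward : Int) : List (Int × List (Int × List (Int × Int))) :=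
  (PySem.List.pyRange 0 (statespace.length : Int) 1).foldl (fun acc i =>
    let state := PySem.List.pyGetD statespace i 0
    acc ++ [(i,
      (PySem.List.pyRange 0 actiondef 1).foldl (fun accd d =>
        accd ++ [(d,
          (PySem.List.pyRange 0 actionatt 1).foldl (fun acca a =>
            acca ++ [(a, if state ∈ G ∧ d = 0 then reward else 0)]) [])]) [])]) []

-- ===== PORT B =====
-- dict.fromkeys(range(n), v) over fresh keys = the pair list; dict(tmpl) copies the pair list;
-- Reward[i][d] = row is an update at key i (map) appending the fresh key d inside.
def AssignReward_alt (G : List Int) (statespace : List Int) (actiondef : Int) (actionatt : Int) (reward : Int) : List (Int × List (Int × List (Int × Int))) :=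
  let gs := PySem.Set.ofList G
  let zeroRow : List (Int × Int) := (PySem.List.pyRange 0 actionatt 1).map (fun a => (a, (0 : Int)))
  let goalRow : List (Int × Int) := (PySem.List.pyRange 0 actionatt 1).map (fun a => (a, reward))
  let init : List (Int × List (Int × List (Int × Int))) :=
    (PySem.List.pyRange 0 (statespace.length : Int) 1).map (fun i => (i, []))
  (PySem.List.pyRange 0 ((statespace.length : Int) * actiondef) 1).foldl
    (fun out t =>
      let i := PySem.Int.floordiv t actiondef
      let d := PySem.Int.mod t actiondef
      let row := if d = 0 ∧ PySem.List.pyGetD statespace i 0 ∈ gs then goalRow else zeroRow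
      out.map (fun q => if q.1 == i then (q.1, q.2 ++ [(d, row)]) else q))
    init

-- ===== PRECONDITION & SPEC =====
def Spec_AssignReward (G : List Int) (statespace : List Int) (actiondef : Int) (actionatt : Int) (reward : Int) (out : List (Int × List (Int × List (Int × Int)))) : Prop := out = AssignReward_alt G statespace actiondef actionatt reward
instance (G : List Int) (statespace : List Int) (actiondef : Int) (actionatt : Int) (reward : Int) (out : List (Int × List (Int × List (Int × Int)))) : Decidable (Spec_AssignReward G statespace actiondef actionatt reward out) := by unfold Spec_AssignReward; infer_instance

-- ===== CLAIM (what is proved, stated in full; the proofs are below) =====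
def Claim_equal_AssignReward : Prop := ∀ (G : List Int) (statespace : List Int) (actiondef : Int) (actionatt : Int) (reward : Int), Dom_AssignReward G statespace actiondef actionatt reward → Spec_AssignReward G statespace actiondef actionatt reward (AssignReward G statespace actiondef actionatt reward)

-- ===== LEMMAS AND PROOFS =====

-- a foldl whose every step is a pointwise map distributes over append of the accumulator
theorem pv_foldl_map_append {α β : Type} (g : α → β → β) (ts : List α) (L1 L2 : List β) :
    ts.foldl (fun out t => out.map (g t)) (L1 ++ L2)
      = ts.foldl (fun out t => out.map (g t)) L1 ++ ts.foldl (fun out t => out.map (g t)) L2 := by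
  induction ts generalizing L1 L2 with
  | nil => rfl
  | cons t ts ih => simp only [List.foldl_cons, List.map_append]; exact ih _ _

-- steps that fix every element of the accumulator leave it unchanged
theorem pv_foldl_map_id {α β : Type} (g : α → β → β) (ts : List α) (L : List β)
    (h : ∀ t ∈ ts, ∀ x ∈ L, g t x = x) :
    ts.foldl (fun out t => out.map (g t)) L = L := by
  induction ts with
  | nil => rfl
  | cons t ts ih =>
    simp only [List.foldl_cons]
    rw [List.map_congr_left (fun x hx => h t (by simp) x hx)]
    simp only [List.map_id_fun', id]
    exact ih (fun t' ht' x hx => h t' (List.mem_cons_of_mem _ ht') x hx)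

-- the update fold on a singleton whose key every step hits appends all the pairs
theorem pv_foldl_map_single {α R : Type} (iOf : α → Int) (pOf : α → R) (ts : List α) (m : Int)
    (h : ∀ t ∈ ts, iOf t = m) : ∀ (r : List R),
    ts.foldl (fun out t => out.map
        (fun q => if q.1 == iOf t then (q.1, q.2 ++ [pOf t]) else q)) [(m, r)]
      = [(m, r ++ ts.map pOf)] := by
  induction ts with
  | nil => intro r; simp
  | cons t ts ih =>
    intro r
    simp only [List.foldl_cons, List.map_cons, List.map_nil]
    rw [h t (List.mem_cons_self)]
    simp only [beq_self_eq_true, if_true]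
    rw [ih (fun t' ht' => h t' (List.mem_cons_of_mem _ ht')) (r ++ [pOf t])]
    simp

theorem pv_ediv_lt {t m D : Int} (hD : 0 < D) (h : t < m * D) : t / D < m := by
  by_contra hx
  rw [not_lt] at hx
  have h1 := Int.mul_ediv_add_emod t D
  have h2 := Int.emod_nonneg t (ne_of_gt hD)
  nlinarith [mul_le_mul_of_nonneg_left hx (le_of_lt hD)]

theorem pv_ediv_block {t m D : Int} (hD : 0 < D) (h1 : m * D ≤ t) (h2 : t < (m + 1) * D) :
    t / D = m ∧ t % D = t - m * D := by
  have hexp : (m + 1) * D = m * D + D := by ring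
  have hk0 : 0 ≤ t - m * D := by omega
  have hk1 : t - m * D < D := by omega
  have ht : t = (t - m * D) + D * m := by ring
  constructor
  · rw [ht, Int.add_mul_ediv_left _ _ (ne_of_gt hD),
      Int.ediv_eq_zero_of_lt hk0 hk1, zero_add]
  · rw [ht, Int.add_mul_emod_self_left, Int.emod_eq_of_lt hk0 hk1]
    omega

-- the flat divmod-decoded fold builds exactly the nested map
theorem pv_flat_fold (D : Int) (row : Int → Int → List (Int × Int)) : ∀ (m : Nat),
    (PySem.List.pyRange 0 ((m : Int) * D) 1).foldl
      (fun out t => out.map (fun q =>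
        if q.1 == PySem.Int.floordiv t D then
          (q.1, q.2 ++ [(PySem.Int.mod t D, row (PySem.Int.floordiv t D) (PySem.Int.mod t D))])
        else q))
      ((PySem.List.pyRange 0 (m : Int) 1).map (fun i => (i, [])))
    = (PySem.List.pyRange 0 (m : Int) 1).map
        (fun i => (i, (PySem.List.pyRange 0 D 1).map (fun d => (d, row i d)))) := by
  intro m
  induction m with
  | zero =>
    simp [PySem.List.pyRange_one_eq_nil (by norm_num : (0:Int) ≤ 0)]
  | succ m ih =>
    by_cases hD : D ≤ 0
    · have hts : ((m + 1 : Nat) : Int) * D ≤ 0 :=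
        mul_nonpos_of_nonneg_of_nonpos (by positivity) hD
      rw [PySem.List.pyRange_one_eq_nil hts, PySem.List.pyRange_one_eq_nil hD]
      simp
    · rw [not_le] at hD
      have hcast : ((m + 1 : Nat) : Int) = (m : Int) + 1 := by push_cast; ring
      have hsplit : PySem.List.pyRange 0 (((m : Int) + 1) * D) 1
          = PySem.List.pyRange 0 ((m : Int) * D) 1
            ++ PySem.List.pyRange ((m : Int) * D) (((m : Int) + 1) * D) 1 :=
        PySem.List.pyRange_one_append _ _ _ (by positivity) (by nlinarith)
      have hinit : PySem.List.pyRange 0 ((m : Int) + 1) 1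
          = PySem.List.pyRange 0 (m : Int) 1 ++ [(m : Int)] :=
        PySem.List.pyRange_one_succ_right (by positivity)
      rw [hcast, hsplit, hinit, List.foldl_append, List.map_append]
      simp only [List.map_cons, List.map_nil]
      rw [pv_foldl_map_append]
      -- the prefix fold does not touch the fresh entry m
      rw [pv_foldl_map_id _ _ ([((m : Int), [])]) (by
        intro t ht x hx
        rw [PySem.List.mem_pyRange_one] at ht
        simp only [List.mem_singleton] at hx
        subst hx
        have hlt : t / D < (m : Int) := pv_ediv_lt hD ht.2
        have : ((m : Int) == PySem.Int.floordiv t D) = false := by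
          simp only [beq_eq_false_iff_ne, ne_eq]
          rw [PySem.Int.floordiv_eq_ediv_of_pos hD]
          omega
        simp [this])]
      rw [ih]
      rw [pv_foldl_map_append]
      -- the block fold does not touch the entries with key < m
      rw [pv_foldl_map_id _ _ _ (by
        intro t ht x hx
        rw [PySem.List.mem_pyRange_one] at ht
        rcases List.mem_map.1 hx with ⟨i, hi, rfl⟩
        rw [PySem.List.mem_pyRange_one] at hi
        have hdiv : t / D = (m : Int) := (pv_ediv_block hD ht.1 ht.2).1
        have : (i == PySem.Int.floordiv t D) = false := by
          simp only [beq_eq_false_iff_ne, ne_eq]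
          rw [PySem.Int.floordiv_eq_ediv_of_pos hD]
          omega
        simp [this])]
      -- the block fold fills the entry m with the row list
      rw [pv_foldl_map_single (fun t => PySem.Int.floordiv t D)
        (fun t => (PySem.Int.mod t D, row (PySem.Int.floordiv t D) (PySem.Int.mod t D)))
        _ (m : Int) (by
          intro t ht
          rw [PySem.List.mem_pyRange_one] at ht
          show PySem.Int.floordiv t D = (m : Int)
          rw [PySem.Int.floordiv_eq_ediv_of_pos hD]
          exact (pv_ediv_block hD ht.1 ht.2).1) []]
      rw [List.nil_append]
      -- reindex the block range to pyRange 0 D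
      have hblock : (PySem.List.pyRange ((m : Int) * D) (((m : Int) + 1) * D) 1).map
            (fun t => (PySem.Int.mod t D, row (PySem.Int.floordiv t D) (PySem.Int.mod t D)))
          = (PySem.List.pyRange 0 D 1).map (fun d => (d, row (m : Int) d)) := by
        rw [PySem.List.pyRange_one ((m : Int) * D), PySem.List.pyRange_one 0 D]
        have hlen : (((m : Int) + 1) * D - (m : Int) * D).toNat = (D - 0).toNat := by
          congr 1; ring
        rw [hlen, List.map_map, List.map_map]
        apply List.map_congr_left
        intro k hk
        rw [List.mem_range] at hk
        have hk' : (k : Int) < D := by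
          have := hk
          omega
        have hb : (m : Int) * D ≤ (m : Int) * D + (k : Int) :=
          le_add_of_nonneg_right (by positivity)
        have hb2 : (m : Int) * D + (k : Int) < ((m : Int) + 1) * D := by nlinarith
        have hdm := pv_ediv_block hD hb hb2
        simp only [Function.comp_apply, zero_add]
        rw [PySem.Int.floordiv_eq_ediv_of_pos hD, PySem.Int.mod_eq_emod_of_pos hD]
        rw [hdm.1]
        have : ((m : Int) * D + (k : Int)) % D = (m : Int) * D + (k : Int) - (m : Int) * D :=
          hdm.2
        rw [this]
        norm_num
      rw [hblock, List.map_append]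
      simp only [List.map_cons, List.map_nil]

-- A's nested append-folds as nested maps
theorem pv_A_as_map (G : List Int) (statespace : List Int) (actiondef actionatt reward : Int) :
    AssignReward G statespace actiondef actionatt reward
      = (PySem.List.pyRange 0 (statespace.length : Int) 1).map (fun i =>
          (i, (PySem.List.pyRange 0 actiondef 1).map (fun d =>
            (d, (PySem.List.pyRange 0 actionatt 1).map (fun a =>
              (a, if PySem.List.pyGetD statespace i 0 ∈ G ∧ d = 0 then reward else 0)))))) := by
  unfold AssignReward
  simp only [PySem.List.foldl_append_singleton_eq_map, List.nil_append]

-- ===== VERDICT (by name: the statement is the Claim_ definition above) =====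
theorem AssignReward_spec : Claim_equal_AssignReward := by
  intro G statespace actiondef actionatt reward _
  unfold Spec_AssignReward
  have hB : AssignReward_alt G statespace actiondef actionatt reward
      = (PySem.List.pyRange 0 (statespace.length : Int) 1).map (fun i =>
          (i, (PySem.List.pyRange 0 actiondef 1).map (fun d =>
            (d, if d = 0 ∧ PySem.List.pyGetD statespace i 0 ∈ PySem.Set.ofList G then
                  (PySem.List.pyRange 0 actionatt 1).map (fun a => (a, reward))
                else (PySem.List.pyRange 0 actionatt 1).map (fun a => (a, (0 : Int))))))) :=
    pv_flat_fold actiondef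
      (fun i d => if d = 0 ∧ PySem.List.pyGetD statespace i 0 ∈ PySem.Set.ofList G then
          (PySem.List.pyRange 0 actionatt 1).map (fun a => (a, reward))
        else (PySem.List.pyRange 0 actionatt 1).map (fun a => (a, (0 : Int))))
      statespace.length
  rw [pv_A_as_map, hB]
  apply List.map_congr_left
  intro i _
  congr 1
  apply List.map_congr_left
  intro d _
  congr 1
  by_cases hc : PySem.List.pyGetD statespace i 0 ∈ G ∧ d = 0
  · obtain ⟨h1, h2⟩ := hc
    subst h2
    rw [if_pos (show (0 : Int) = 0 ∧ PySem.List.pyGetD statespace i 0 ∈ PySem.Set.ofList G from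
      ⟨rfl, by simp [PySem.Set.mem_ofList, h1]⟩)]
    apply List.map_congr_left
    intro a _
    simp [h1]
  · rw [if_neg (show ¬(d = 0 ∧ PySem.List.pyGetD statespace i 0 ∈ PySem.Set.ofList G) from by
      simp only [PySem.Set.mem_ofList]
      exact fun h => hc ⟨h.2, h.1⟩)]
    apply List.map_congr_left
    intro a _
    simp [hc]
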